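-- pv_equiv track=rewrite | github.com/sahinseyfi/sera | app.py | _merge_metric_status
-- ===== SOURCE A (Python) =====
-- from typing import Any, Deque, Dict, List, Optional, Tuple
--
-- def _quality_to_status(quality: Optional[str]) -> str:
--     if quality is None or quality in ("ok", "simulated"):
--         return "ok"
--     if quality in ("missing", "disabled"):
--         return quality
--     return "error"
--
-- def _merge_metric_status(entries: List[Optional[Dict[str, Any]]]) -> str:
--     statuses = [_quality_to_status(entry.get("quality")) for entry in entries if entry]
--     if not statuses:
--         return "missing"
--     if "error" in statuses:
--         return "error"
--     if "missing" in statuses: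
--         return "missing"
--     if "disabled" in statuses:
--         return "disabled"
--     return "ok"
-- ===== SOURCE B (Python) =====
-- from typing import Any, Dict, List, Optional
--
--
-- def _quality_to_status(quality: Optional[str]) -> str:
--     if quality is None or quality in ("ok", "simulated"):
--         return "ok"
--     if quality in ("missing", "disabled"):
--         return quality
--     return "error"
--
--
-- def _status_rank(status: str) -> int:
--     if status == "error":
--         return 3
--     if status == "missing":
--         return 2
--     if status == "disabled":
--         return 1
--     return 0
--
--
-- def _rank_status(rank: int) -> str:
--     if rank == 3:
--         return "error"
--     if rank == 2:
--         return "missing"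
--     if rank == 1:
--         return "disabled"
--     return "ok"
--
--
-- def _merge_metric_status(entries: List[Optional[Dict[str, Any]]]) -> str:
--     best = -1
--     for entry in entries:
--         if entry:
--             r = _status_rank(_quality_to_status(entry.get("quality")))
--             if r > best:
--                 best = r
--     if best < 0:
--         return "missing"
--     return _rank_status(best)
-- ===== Notes on version B (the rewrite author's own statement) =====
-- stated objective: simpler
-- what changed: Replaces building the full status list plus three separate membership scans with a single pass that keeps the maximum severity rank (ok<disabled<missing<error) and maps it back to a status at the end.
import Mathlib
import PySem

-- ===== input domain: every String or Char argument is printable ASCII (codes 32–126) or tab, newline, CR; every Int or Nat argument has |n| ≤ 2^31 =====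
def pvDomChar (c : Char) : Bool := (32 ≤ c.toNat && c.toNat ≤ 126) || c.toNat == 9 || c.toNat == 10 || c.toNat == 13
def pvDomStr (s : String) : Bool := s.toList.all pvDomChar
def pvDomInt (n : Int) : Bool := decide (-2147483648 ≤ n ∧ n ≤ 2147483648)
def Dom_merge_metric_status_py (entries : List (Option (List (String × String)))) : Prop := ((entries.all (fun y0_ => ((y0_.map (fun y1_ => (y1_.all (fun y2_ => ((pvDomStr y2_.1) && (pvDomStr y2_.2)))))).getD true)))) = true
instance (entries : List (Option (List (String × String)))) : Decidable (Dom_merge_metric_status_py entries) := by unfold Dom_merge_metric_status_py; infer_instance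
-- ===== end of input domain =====

-- B: single-pass maximum-severity fold instead of list build + three membership scans (simpler, one pass).

-- ===== PORT A =====
def pvQ2S (q : Option String) : String :=
  match q with
  | none => "ok"
  | some s => if s == "ok" || s == "simulated" then "ok"
      else if s == "missing" || s == "disabled" then s
      else "error"

def merge_metric_status_py (entries : List (Option (List (String × String)))) : String :=
  let statuses := entries.foldr (fun e acc =>
    match e with
    | none => acc
    | some d => if d.isEmpty then acc
        else pvQ2S ((PySem.Dict.mk d).get? "quality") :: acc) []
  if statuses.isEmpty then "missing"
  else if statuses.contains "error" then "error"
  else if statuses.contains "missing" then "missing"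
  else if statuses.contains "disabled" then "disabled"
  else "ok"

-- ===== PORT B =====
def pvQ2SB (q : Option String) : String :=
  match q with
  | none => "ok"
  | some s => if s == "ok" || s == "simulated" then "ok"
      else if s == "missing" || s == "disabled" then s
      else "error"

def pvStatusRank (s : String) : Int :=
  if s == "error" then 3
  else if s == "missing" then 2
  else if s == "disabled" then 1
  else 0

def pvRankStatus (r : Int) : String :=
  if r == 3 then "error"
  else if r == 2 then "missing"
  else if r == 1 then "disabled"
  else "ok"

def merge_metric_status_py_alt (entries : List (Option (List (String × String)))) : String :=
  let best := entries.foldl (fun best e =>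
    match e with
    | none => best
    | some d => if d.isEmpty then best
        else
          let r := pvStatusRank (pvQ2SB ((PySem.Dict.mk d).get? "quality"))
          if r > best then r else best) (-1)
  if best < 0 then "missing" else pvRankStatus best

-- ===== PRECONDITION & SPEC =====
def Spec_merge_metric_status_py (entries : List (Option (List (String × String)))) (out : String) : Prop := out = merge_metric_status_py_alt entries
instance (entries : List (Option (List (String × String)))) (out : String) : Decidable (Spec_merge_metric_status_py entries out) := by unfold Spec_merge_metric_status_py; infer_instance

-- ===== CLAIM (what is proved, stated in full; the proofs are below) =====
def Claim_equal_merge_metric_status_py : Prop := ∀ (entries : List (Option (List (String × String)))), Dom_merge_metric_status_py entries → Spec_merge_metric_status_py entries (merge_metric_status_py entries)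

-- ===== LEMMAS AND PROOFS =====

-- the status list A builds
def pvStList (entries : List (Option (List (String × String)))) : List String :=
  entries.foldr (fun e acc =>
    match e with
    | none => acc
    | some d => if d.isEmpty then acc
        else pvQ2S ((PySem.Dict.mk d).get? "quality") :: acc) []

-- the running maximum B computes, over a status list
def pvFMax (s : List String) (b : Int) : Int :=
  s.foldl (fun a x => if pvStatusRank x > a then pvStatusRank x else a) b

theorem pvRank_nonneg (x : String) : 0 ≤ pvStatusRank x := by
  unfold pvStatusRank; split_ifs <;> omega

theorem pvRank_le (x : String) : pvStatusRank x ≤ 3 := by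
  unfold pvStatusRank; split_ifs <;> omega

theorem pvRank3 (x : String) : 3 ≤ pvStatusRank x ↔ x = "error" := by
  unfold pvStatusRank
  split_ifs with h1 h2 h3 <;>
    simp_all [beq_iff_eq] <;> omega

theorem pvRank2 (x : String) : 2 ≤ pvStatusRank x ↔ x = "error" ∨ x = "missing" := by
  unfold pvStatusRank
  split_ifs with h1 h2 h3 <;>
    simp_all [beq_iff_eq] <;> omega

theorem pvRank1 (x : String) :
    1 ≤ pvStatusRank x ↔ x = "error" ∨ x = "missing" ∨ x = "disabled" := by
  unfold pvStatusRank
  split_ifs with h1 h2 h3 <;>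
    simp_all [beq_iff_eq] <;> omega

-- cons-step equations for the status list
theorem pvStList_cons_none (rest : List (Option (List (String × String)))) :
    pvStList (none :: rest) = pvStList rest := rfl

theorem pvStList_cons_some (d : List (String × String))
    (rest : List (Option (List (String × String)))) :
    pvStList (some d :: rest) =
      if d.isEmpty then pvStList rest
      else pvQ2S ((PySem.Dict.mk d).get? "quality") :: pvStList rest := rfl

-- B's fold over the entries equals the max-fold over A's status list
theorem pvFold_eq (entries : List (Option (List (String × String)))) (b : Int) :
    entries.foldl (fun best e =>
      match e with
      | none => best
      | some d => if d.isEmpty then best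
          else
            let r := pvStatusRank (pvQ2SB ((PySem.Dict.mk d).get? "quality"))
            if r > best then r else best) b
    = pvFMax (pvStList entries) b := by
  induction entries generalizing b with
  | nil => rfl
  | cons e rest ih =>
    cases e with
    | none => simpa [pvStList_cons_none, pvFMax] using ih b
    | some d =>
      have hq : pvQ2SB = pvQ2S := rfl
      by_cases hd : d = []
      · simpa [pvStList_cons_some, hd, pvFMax] using ih b
      · simpa [pvStList_cons_some, hd, pvFMax, hq] using ih _

theorem pvFMax_ge_iff (s : List String) (b k : Int) :
    k ≤ pvFMax s b ↔ k ≤ b ∨ ∃ x ∈ s, k ≤ pvStatusRank x := by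
  induction s generalizing b with
  | nil => simp [pvFMax]
  | cons x rest ih =>
    simp only [pvFMax, List.foldl_cons] at *
    rw [ih]
    constructor
    · rintro (h | h)
      · split_ifs at h with hx
        · exact Or.inr ⟨x, by simp, h⟩
        · exact Or.inl h
      · obtain ⟨y, hy, hk⟩ := h
        exact Or.inr ⟨y, by simp [hy], hk⟩
    · rintro (h | ⟨y, hy, hk⟩)
      · left; split_ifs with hx <;> omega
      · rcases List.mem_cons.mp hy with rfl | hy
        · left; split_ifs with hx <;> omega
        · exact Or.inr ⟨y, hy, hk⟩

theorem pvFMax_le (s : List String) (b : Int) (hb : b ≤ 3) : pvFMax s b ≤ 3 := by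
  induction s generalizing b with
  | nil => exact hb
  | cons x rest ih =>
    simp only [pvFMax, List.foldl_cons]
    apply ih
    split_ifs with hx
    · exact pvRank_le x
    · exact hb

theorem pvMain (entries : List (Option (List (String × String)))) :
    merge_metric_status_py entries = merge_metric_status_py_alt entries := by
  have hA : merge_metric_status_py entries =
      (if (pvStList entries).isEmpty then "missing"
       else if (pvStList entries).contains "error" then "error"
       else if (pvStList entries).contains "missing" then "missing"
       else if (pvStList entries).contains "disabled" then "disabled"
       else "ok") := rfl
  have hB : merge_metric_status_py_alt entries =
      (if pvFMax (pvStList entries) (-1) < 0 then "missing"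
       else pvRankStatus (pvFMax (pvStList entries) (-1))) := by
    unfold merge_metric_status_py_alt
    rw [pvFold_eq]
  rw [hA, hB]
  have hge := pvFMax_ge_iff (pvStList entries) (-1)
  have hub : pvFMax (pvStList entries) (-1) ≤ 3 := pvFMax_le _ _ (by omega)
  have hlb : -1 ≤ pvFMax (pvStList entries) (-1) := (hge (-1)).mpr (Or.inl le_rfl)
  generalize hm : pvFMax (pvStList entries) (-1) = m at hge hub hlb ⊢
  generalize hsl : pvStList entries = s at *
  have hmem0 : (0 : Int) ≤ m ↔ s ≠ [] := by
    rw [hge]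
    constructor
    · rintro (h | ⟨x, hx, -⟩)
      · omega
      · exact List.ne_nil_of_mem hx
    · intro h
      obtain ⟨x, hx⟩ := List.exists_mem_of_ne_nil s h
      exact Or.inr ⟨x, hx, pvRank_nonneg x⟩
  have herr : (3 : Int) ≤ m ↔ "error" ∈ s := by
    rw [hge]
    constructor
    · rintro (h | ⟨x, hx, hk⟩)
      · omega
      · rwa [(pvRank3 x).mp hk] at hx
    · intro h
      exact Or.inr ⟨"error", h, by rw [pvRank3]⟩
  have hmis : (2 : Int) ≤ m ↔ "error" ∈ s ∨ "missing" ∈ s := by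
    rw [hge]
    constructor
    · rintro (h | ⟨x, hx, hk⟩)
      · omega
      · rcases (pvRank2 x).mp hk with rfl | rfl
        · exact Or.inl hx
        · exact Or.inr hx
    · rintro (h | h)
      · exact Or.inr ⟨"error", h, by rw [pvRank2]; left; rfl⟩
      · exact Or.inr ⟨"missing", h, by rw [pvRank2]; right; rfl⟩
  have hdis : (1 : Int) ≤ m ↔ "error" ∈ s ∨ "missing" ∈ s ∨ "disabled" ∈ s := by
    rw [hge]
    constructor
    · rintro (h | ⟨x, hx, hk⟩)
      · omega
      · rcases (pvRank1 x).mp hk with rfl | rfl | rfl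
        · exact Or.inl hx
        · exact Or.inr (Or.inl hx)
        · exact Or.inr (Or.inr hx)
    · rintro (h | h | h)
      · exact Or.inr ⟨"error", h, by rw [pvRank1]; left; rfl⟩
      · exact Or.inr ⟨"missing", h, by rw [pvRank1]; right; left; rfl⟩
      · exact Or.inr ⟨"disabled", h, by rw [pvRank1]; right; right; rfl⟩
  have hcases : m = -1 ∨ m = 0 ∨ m = 1 ∨ m = 2 ∨ m = 3 := by omega
  rcases hcases with rfl | rfl | rfl | rfl | rfl
  · -- no entries counted
    have hempty : s = [] := by
      by_contra h
      have := hmem0.mpr h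
      omega
    simp [hempty]
  · -- all ok
    have hne : s ≠ [] := hmem0.mp (by omega)
    have h1 : ¬ (1 : Int) ≤ (0 : Int) := by omega
    rw [hdis] at h1
    push_neg at h1
    obtain ⟨he, hmi, hd⟩ := h1
    simp [List.isEmpty_iff, hne, he, hmi, hd, pvRankStatus]
  · -- worst is disabled
    have h2 : ¬ (2 : Int) ≤ (1 : Int) := by omega
    rw [hmis] at h2
    push_neg at h2
    obtain ⟨he, hmi⟩ := h2
    have hd : "disabled" ∈ s := by
      rcases hdis.mp le_rfl with h | h | h
      · exact absurd h he
      · exact absurd h hmi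
      · exact h
    have hne : s ≠ [] := List.ne_nil_of_mem hd
    simp [List.isEmpty_iff, hne, he, hmi, hd, pvRankStatus]
  · -- worst is missing
    have h3 : ¬ (3 : Int) ≤ (2 : Int) := by omega
    rw [herr] at h3
    have hmi : "missing" ∈ s := by
      rcases hmis.mp le_rfl with h | h
      · exact absurd h h3
      · exact h
    have hne : s ≠ [] := List.ne_nil_of_mem hmi
    simp [List.isEmpty_iff, hne, h3, hmi, pvRankStatus]
  · -- error present
    have he : "error" ∈ s := herr.mp le_rfl
    have hne : s ≠ [] := List.ne_nil_of_mem he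
    simp [List.isEmpty_iff, hne, he, pvRankStatus]

-- ===== VERDICT (by name: the statement is the Claim_ definition above) =====
theorem merge_metric_status_py_spec : Claim_equal_merge_metric_status_py := by
  intro entries _
  unfold Spec_merge_metric_status_py
  exact pvMain entries
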